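-- pv_equiv track=rewrite | github.com/TUCAN-nest/TUCAN | tucan/io/molfile_reader.py | _concat_lines_with_dash
-- ===== SOURCE A (Python) =====
-- from collections import deque
--
-- def _concat_lines_with_dash(lines: list[str]) -> list[str]:
--     final_lines = []
--     lines = deque(lines)
--
--     while lines:
--         curr_line = lines.popleft()
--
--         if not lines:
--             final_lines.append(curr_line)
--             break
--
--         if not (curr_line.startswith("M  V30 ") and curr_line.endswith("-")):
--             final_lines.append(curr_line)
--             continue
--
--         next_line = lines.popleft()
--         if not next_line.startswith("M  V30 "):
--             raise MolfileParserException(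
--                 f'Invalid concatenation of lines "{curr_line}" and "{next_line}"'
--             )
--
--         lines.appendleft(curr_line[0:-1] + next_line[7:])
--
--     return final_lines
--
-- class MolfileParserException(Exception):
--     pass
-- ===== SOURCE B (Python) =====
-- class MolfileParserException(Exception):
--     pass
--
--
-- def _concat_lines_with_dash(lines: list[str]) -> list[str]:
--     final_lines = []
--     i = 0
--     n = len(lines)
--     while i < n:
--         curr_line = lines[i]
--         i += 1
--         # inner accumulation loop: keep absorbing continuation lines into curr_line
--         while curr_line.startswith("M  V30 ") and curr_line.endswith("-") and i < n:
--             next_line = lines[i]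
--             if not next_line.startswith("M  V30 "):
--                 raise MolfileParserException(
--                     f'Invalid concatenation of lines "{curr_line}" and "{next_line}"'
--                 )
--             curr_line = curr_line[0:-1] + next_line[7:]
--             i += 1
--         final_lines.append(curr_line)
--     return final_lines
-- ===== Notes on version B (the rewrite author's own statement) =====
-- stated objective: simpler
-- what changed: Replaces the deque worklist that re-enqueues each merged line with appendleft by a forward scan: an outer loop over the lines plus an inner loop that absorbs consecutive continuation lines into the current line, so no queue is mutated and each line is visited once by index.
import Mathlib
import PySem

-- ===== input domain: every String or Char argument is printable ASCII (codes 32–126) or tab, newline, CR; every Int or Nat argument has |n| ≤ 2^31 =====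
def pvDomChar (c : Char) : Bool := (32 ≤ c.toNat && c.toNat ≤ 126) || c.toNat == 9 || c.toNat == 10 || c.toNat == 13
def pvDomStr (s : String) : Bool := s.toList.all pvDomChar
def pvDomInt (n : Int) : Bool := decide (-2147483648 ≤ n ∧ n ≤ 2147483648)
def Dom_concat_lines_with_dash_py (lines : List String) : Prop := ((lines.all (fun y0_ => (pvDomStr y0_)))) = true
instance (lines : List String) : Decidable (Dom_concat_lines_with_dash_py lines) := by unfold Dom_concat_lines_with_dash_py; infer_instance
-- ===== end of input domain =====

-- B replaces A's deque worklist (which re-enqueues every merged line with appendleft) by a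
-- forward scan with an inner accumulation loop: simpler control flow, same return value.

-- "M  V30 " (the V30 continuation prefix, 7 characters)
def pvPfx : String := "M  V30 "

-- curr_line[0:-1] + next_line[7:] — both Pythons build the merged line with this exact expression
-- ([0:-1] and [7:] are the PySem slices; string + is list append under String.ofList)
def pvMergeLine (curr next : String) : String :=
  String.ofList ((PySem.Str.slice curr none (some (-1))).toList ++ (PySem.Str.slice next (some 7) none).toList)

-- ===== PORT A =====
-- while-loop over the deque: state = (final_lines so far, remaining deque)
def pvGoA (acc : List String) : List String → List String
  | [] => acc
  | [curr] => acc ++ [curr]                                   -- "if not lines: append; break"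
  | curr :: next :: rest =>
    if !(PySem.Str.startswith curr pvPfx && PySem.Str.endswith curr "-") then
      pvGoA (acc ++ [curr]) (next :: rest)                    -- append; continue
    else if !(PySem.Str.startswith next pvPfx) then
      acc                                                     -- raise MolfileParserException (excluded by Pre_)
    else
      pvGoA acc (pvMergeLine curr next :: rest)               -- lines.appendleft(merged)
  termination_by l => l.length
  decreasing_by all_goals simp

def concat_lines_with_dash_py (lines : List String) : List String := pvGoA [] lines

-- ===== PORT B =====
-- inner while loop of Source B: absorb continuation lines into curr; returns (curr, unconsumed rest)
def pvInnerB (curr : String) (rest : List String) : String × List String :=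
  match rest with
  | [] => (curr, [])                                          -- i < n fails
  | next :: rest' =>
    if PySem.Str.startswith curr pvPfx && PySem.Str.endswith curr "-" then
      if !(PySem.Str.startswith next pvPfx) then
        (curr, next :: rest')                                 -- raise MolfileParserException (excluded by Pre_)
      else
        pvInnerB (pvMergeLine curr next) rest'
    else (curr, next :: rest')

-- the inner loop only consumes lines (cited by pvGoB's decreasing_by)
theorem pvInnerB_len (curr : String) (rest : List String) :
    (pvInnerB curr rest).2.length ≤ rest.length := by
  induction rest generalizing curr with
  | nil => simp [pvInnerB]
  | cons next rest' ih =>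
    simp only [pvInnerB]
    split
    · split
      · simp
      · exact le_trans (ih _) (by simp)
    · simp

-- outer while loop of Source B
def pvGoB : List String → List String
  | [] => []
  | curr :: rest => (pvInnerB curr rest).1 :: pvGoB (pvInnerB curr rest).2
  termination_by l => l.length
  decreasing_by simp; have := pvInnerB_len curr rest; omega

def concat_lines_with_dash_py_alt (lines : List String) : List String := pvGoB lines

-- ===== PRECONDITION & SPEC =====
-- number of trailing '-' characters of a list of characters
def pvDsc (l : List Char) : Nat := (l.reverse.takeWhile (· == '-')).length

-- dash-counter transition for a line carrying the "M  V30 " prefix: t = the line's tail after the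
-- prefix; an all-dash tail extends the pending trailing-dash run (one dash of which the merge
-- consumes), any other tail resets the run to its own trailing dashes
def pvStep (d : Nat) (b : String) : Nat :=
  if (b.toList.drop 7).all (· == '-') then (d - 1) + (b.toList.drop 7).length
  else pvDsc (b.toList.drop 7)

-- one-counter scan: d = the trailing-dash count of the line A is currently accumulating
def pvScanOk : Nat → List String → Bool
  | _, [] => true
  | d, b :: r =>
    if PySem.Str.startswith b pvPfx then pvScanOk (pvStep d b) r
    else if 1 ≤ d then false else pvScanOk 0 r

-- Pre_ excludes exactly the inputs on which A raises MolfileParserException (a dash-ended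
-- accumulated "M  V30 " line followed by a line without that prefix); the condition is read off
-- the input by a single trailing-dash counter scanned once over the lines — it builds no strings
-- and is exact: pvScanOk 0 lines = true iff A returns normally.
def Pre_concat_lines_with_dash_py (lines : List String) : Prop := pvScanOk 0 lines = true
instance (lines : List String) : Decidable (Pre_concat_lines_with_dash_py lines) := by
  unfold Pre_concat_lines_with_dash_py; infer_instance

def pvWitness_concat_lines_with_dash_py : List String :=
  ["M  V30 COUNTS 2 1 0 0 -", "M  V30 0", "M  END"]

def Spec_concat_lines_with_dash_py (lines : List String) (out : List String) : Prop := out = concat_lines_with_dash_py_alt lines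
instance (lines : List String) (out : List String) : Decidable (Spec_concat_lines_with_dash_py lines out) := by unfold Spec_concat_lines_with_dash_py; infer_instance

-- ===== CLAIM (what is proved, stated in full; the proofs are below) =====
def Claim_equal_concat_lines_with_dash_py : Prop := ∀ (lines : List String), Dom_concat_lines_with_dash_py lines → Pre_concat_lines_with_dash_py lines → Spec_concat_lines_with_dash_py lines (concat_lines_with_dash_py lines)

-- ===== LEMMAS AND PROOFS =====

theorem pvWitness_ok :
    Dom_concat_lines_with_dash_py pvWitness_concat_lines_with_dash_py ∧
    Pre_concat_lines_with_dash_py pvWitness_concat_lines_with_dash_py := by decide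

-- proof-only abstractions of the run state
def pvOk (s : String) : Bool := PySem.Str.startswith s pvPfx && PySem.Str.endswith s "-"
def pvAbs (s : String) : Nat := if PySem.Str.startswith s pvPfx then pvDsc s.toList else 0

-- "the run from state (curr, rest) raises no exception" — mirrors the common step structure
def pvRunOk : String → List String → Bool
  | _, [] => true
  | curr, b :: r =>
    if pvOk curr then
      (if PySem.Str.startswith b pvPfx then pvRunOk (pvMergeLine curr b) r else false)
    else pvRunOk b r

theorem pvToList_merge (c n : String) :
    (pvMergeLine c n).toList = c.toList.dropLast ++ n.toList.drop 7 := by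
  simp [pvMergeLine, PySem.List.slice_to_neg_one, PySem.List.slice_from, String.toList_ofList]

theorem pvSuffix_singleton (l : List Char) (a : Char) : ([a] <:+ l) ↔ l.getLast? = some a := by
  constructor
  · rintro ⟨t, rfl⟩; simp [List.getLast?_append]
  · intro h
    cases l.eq_nil_or_concat with
    | inl h' => subst h'; simp at h
    | inr h' => obtain ⟨t, b, rfl⟩ := h'; simp at h; subst h; exact ⟨t, by simp⟩

-- a string ends with "-" iff its trailing-dash count is positive
theorem pvDsc_pos_iff (s : String) : PySem.Str.endswith s "-" = true ↔ 1 ≤ pvDsc s.toList := by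
  rw [PySem.Str.endswith_eq, show ("-".toList) = ['-'] from rfl, PySem.Chars.endswith_iff,
    pvSuffix_singleton, ← List.head?_reverse]
  unfold pvDsc
  cases h : s.toList.reverse with
  | nil => simp
  | cons a t =>
    simp only [List.takeWhile_cons]
    constructor
    · rintro ⟨rfl⟩; simp
    · intro hl
      by_cases ha : (a == '-') = true
      · simp [beq_iff_eq.mp ha]
      · simp [ha] at hl

-- dropping the trailing '-' decrements the trailing-dash count
theorem pvDsc_dropLast (l : List Char) (h : l.getLast? = some '-') :
    pvDsc l.dropLast = pvDsc l - 1 := by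
  unfold pvDsc
  rw [show l.dropLast.reverse = l.reverse.tail from Eq.symm List.tail_reverse]
  rw [← List.head?_reverse] at h
  cases hr : l.reverse with
  | nil => rw [hr] at h; simp at h
  | cons a t =>
    rw [hr] at h
    simp only [List.head?_cons, Option.some.injEq] at h
    subst h
    simp

-- appending an all-dash tail adds its length to the trailing-dash count
theorem pvDsc_append_all (x t : List Char) (h : t.all (· == '-') = true) :
    pvDsc (x ++ t) = t.length + pvDsc x := by
  unfold pvDsc
  have hall : (t.reverse.takeWhile (· == '-')) = t.reverse := by
    apply List.takeWhile_eq_self_iff.mpr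
    intro a ha
    exact (List.all_eq_true.mp h) a (List.mem_reverse.mp ha)
  rw [List.reverse_append, List.takeWhile_append, hall]
  simp

-- appending a tail with a non-dash character resets the trailing-dash count to the tail's
theorem pvDsc_append_not (x t : List Char) (h : ¬ t.all (· == '-') = true) :
    pvDsc (x ++ t) = pvDsc t := by
  unfold pvDsc
  have hne : (t.reverse.takeWhile (· == '-')).length ≠ t.reverse.length := by
    intro hl
    apply h
    have heq : t.reverse.takeWhile (· == '-') = t.reverse :=
      (List.takeWhile_prefix _).eq_of_length hl
    have hp := List.takeWhile_eq_self_iff.mp heq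
    exact List.all_eq_true.mpr fun a ha => hp a (List.mem_reverse.mpr ha)
  rw [List.reverse_append, List.takeWhile_append, if_neg hne]

-- decompose a prefixed line as pvPfx.toList ++ tail
theorem pvSplit (b : String) (hb : PySem.Str.startswith b pvPfx = true) :
    b.toList = pvPfx.toList ++ b.toList.drop 7 := by
  rw [PySem.Str.startswith_eq, PySem.Chars.startswith_iff] at hb
  obtain ⟨u, hu⟩ := hb
  conv_lhs => rw [← hu]
  have h7 : pvPfx.toList.length = 7 := by decide
  rw [← hu, List.drop_append_of_le_length (by omega)]
  simp [h7]

-- fresh line: the scan's transition from counter 0 computes the line's own trailing-dash count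
theorem pvFresh (b : String) (hb : PySem.Str.startswith b pvPfx = true) :
    pvStep 0 b = pvAbs b := by
  unfold pvAbs pvStep
  rw [if_pos hb]
  conv_rhs => rw [pvSplit b hb]
  by_cases h : ((b.toList.drop 7).all (· == '-')) = true
  · rw [if_pos h, pvDsc_append_all _ _ h]
    have h0 : pvDsc pvPfx.toList = 0 := by decide
    omega
  · rw [if_neg h, pvDsc_append_not _ _ h]

-- merge step: the scan's counter transition computes the merged line's trailing-dash count
theorem pvMergeAbs (curr b : String) (h1 : PySem.Str.startswith curr pvPfx = true)
    (h2 : 1 ≤ pvDsc curr.toList) (_hb : PySem.Str.startswith b pvPfx = true) :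
    pvAbs (pvMergeLine curr b) = pvStep (pvDsc curr.toList) b := by
  have hlast : curr.toList.getLast? = some '-' := by
    rw [← pvSuffix_singleton, ← PySem.Chars.endswith_iff,
      show ['-'] = ("-".toList) from rfl, ← PySem.Str.endswith_eq]
    exact (pvDsc_pos_iff curr).mpr h2
  have hcurr := pvSplit curr h1
  have hu : curr.toList.drop 7 ≠ [] := by
    intro h
    rw [h, List.append_nil] at hcurr
    have h0 : pvDsc curr.toList = 0 := by rw [hcurr]; decide
    omega
  have hdl : curr.toList.dropLast = pvPfx.toList ++ (curr.toList.drop 7).dropLast := by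
    conv_lhs => rw [hcurr]
    exact List.dropLast_append_of_ne_nil hu
  have hpfx : PySem.Str.startswith (pvMergeLine curr b) pvPfx = true := by
    rw [PySem.Str.startswith_eq, PySem.Chars.startswith_iff]
    exact ⟨(curr.toList.drop 7).dropLast ++ b.toList.drop 7,
      by rw [pvToList_merge, hdl, List.append_assoc]⟩
  unfold pvAbs pvStep
  rw [if_pos hpfx, pvToList_merge]
  by_cases h : ((b.toList.drop 7).all (· == '-')) = true
  · rw [if_pos h, pvDsc_append_all _ _ h, pvDsc_dropLast _ hlast]
    omega
  · rw [if_neg h, pvDsc_append_not _ _ h]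

-- the one-counter scan is exactly "the run raises nothing"
theorem pvBridge (rest : List String) : ∀ (curr : String) (d : Nat), pvAbs curr = d →
    pvScanOk d rest = pvRunOk curr rest := by
  induction rest with
  | nil => intro curr d _; rfl
  | cons b r ih =>
    intro curr d hd
    subst hd
    have hok : pvOk curr = true ↔ 1 ≤ pvAbs curr := by
      cases hx : PySem.Str.startswith curr pvPfx with
      | true =>
        have habs : pvAbs curr = pvDsc curr.toList := by unfold pvAbs; rw [hx]; simp
        rw [habs]
        unfold pvOk
        rw [hx, Bool.true_and]
        exact pvDsc_pos_iff curr
      | false =>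
        have h0 : pvAbs curr = 0 := by unfold pvAbs; rw [hx]; simp
        rw [h0]
        unfold pvOk
        rw [hx, Bool.false_and]
        simp
    have hzero : pvOk curr = false → pvAbs curr = 0 := by
      intro h
      by_contra hne
      have hh := hok.mpr (by omega)
      rw [h] at hh
      exact Bool.false_ne_true hh
    show pvScanOk (pvAbs curr) (b :: r) = pvRunOk curr (b :: r)
    unfold pvScanOk pvRunOk
    by_cases hb : PySem.Str.startswith b pvPfx = true
    · rw [if_pos hb, if_pos hb]
      by_cases hc : pvOk curr = true
      · rw [if_pos hc]
        have h1 : PySem.Str.startswith curr pvPfx = true := by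
          unfold pvOk at hc; exact (Bool.and_eq_true _ _ ▸ hc).1
        have habs : pvAbs curr = pvDsc curr.toList := by unfold pvAbs; rw [h1]; simp
        have h2 : 1 ≤ pvDsc curr.toList := by
          have hh := hok.mp hc; rwa [habs] at hh
        apply ih
        rw [pvMergeAbs curr b h1 h2 hb, habs]
      · rw [if_neg hc]
        rw [hzero (Bool.not_eq_true _ ▸ hc), pvFresh b hb]
        exact ih b (pvAbs b) rfl
    · rw [if_neg hb]
      by_cases hc : pvOk curr = true
      · rw [if_pos hc, if_pos (hok.mp hc), if_neg (Bool.not_eq_true _ ▸ hb)]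
      · rw [if_neg hc, if_neg (by rw [hzero (Bool.not_eq_true _ ▸ hc)]; omega)]
        apply ih
        have hbf : PySem.Str.startswith b pvPfx = false := Bool.not_eq_true _ ▸ hb
        unfold pvAbs
        rw [hbf]
        simp

-- on raise-free runs the deque loop and the forward scan return the same list
theorem pvAB : ∀ (l : List String) (curr : String) (acc : List String),
    pvRunOk curr l = true → pvGoA acc (curr :: l) = acc ++ pvGoB (curr :: l) := by
  intro l
  induction l with
  | nil =>
    intro curr acc _
    simp [pvGoA, pvGoB, pvInnerB]
  | cons b r ih =>
    intro curr acc hrun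
    unfold pvRunOk at hrun
    by_cases hc : pvOk curr = true
    · -- merge or raise step
      rw [if_pos hc] at hrun
      have hc' : (PySem.Str.startswith curr pvPfx && PySem.Str.endswith curr "-") = true := hc
      by_cases hb : PySem.Str.startswith b pvPfx = true
      · rw [if_pos hb] at hrun
        have hA : pvGoA acc (curr :: b :: r) = pvGoA acc (pvMergeLine curr b :: r) := by
          rw [pvGoA, hc', hb]
          simp
        have hB : pvGoB (curr :: b :: r) = pvGoB (pvMergeLine curr b :: r) := by
          conv_lhs => rw [pvGoB]
          conv_rhs => rw [pvGoB]
          have hstep : pvInnerB curr (b :: r) = pvInnerB (pvMergeLine curr b) r := by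
            rw [pvInnerB, hc', hb]
            simp
          rw [hstep]
        rw [hA, hB]
        exact ih (pvMergeLine curr b) acc hrun
      · rw [if_neg hb] at hrun
        exact absurd hrun (by simp)
    · -- flush step
      have hcf : pvOk curr = false := by
        cases h : pvOk curr
        · rfl
        · exact absurd h hc
      rw [hcf] at hrun
      simp only [Bool.false_eq_true, if_false] at hrun
      have hcf' : (PySem.Str.startswith curr pvPfx && PySem.Str.endswith curr "-") = false := hcf
      have hA : pvGoA acc (curr :: b :: r) = pvGoA (acc ++ [curr]) (b :: r) := by
        rw [pvGoA, hcf']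
        simp
      have hB : pvGoB (curr :: b :: r) = curr :: pvGoB (b :: r) := by
        conv_lhs => rw [pvGoB]
        have hstep : pvInnerB curr (b :: r) = (curr, b :: r) := by
          rw [pvInnerB, hcf']
          simp
        rw [hstep]
      rw [hA, hB, ih b (acc ++ [curr]) hrun]
      simp

-- ===== VERDICT (by name: the statement is the Claim_ definition above) =====
theorem concat_lines_with_dash_py_spec : Claim_equal_concat_lines_with_dash_py := by
  intro lines _ hpre
  unfold Spec_concat_lines_with_dash_py concat_lines_with_dash_py concat_lines_with_dash_py_alt
  unfold Pre_concat_lines_with_dash_py at hpre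
  cases lines with
  | nil => simp [pvGoA, pvGoB]
  | cons c r =>
    have hrun : pvRunOk c r = true := by
      unfold pvScanOk at hpre
      by_cases hb : PySem.Str.startswith c pvPfx = true
      · rw [if_pos hb] at hpre
        rw [← pvBridge r c (pvStep 0 c) (pvFresh c hb).symm]
        exact hpre
      · rw [if_neg hb, if_neg (by omega)] at hpre
        rw [← pvBridge r c 0 (by
          have hbf : PySem.Str.startswith c pvPfx = false := Bool.not_eq_true _ ▸ hb
          unfold pvAbs
          rw [hbf]
          simp)]
        exact hpre
    simpa using pvAB r c [] hrun
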